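-- pv_equiv track=rewrite | github.com/diksha12p/DSA_Practice_Problems | Largest Integer Index.py | larger_index
-- ===== SOURCE A (Python) =====
-- from typing import List
--
-- def larger_index(arr: List) -> List:
--     result = [-1] * (len(arr))
--     for i in range(len(arr)):
--         for j in range(len(arr) - 1, i, -1):
--             if arr[j] > arr[i]:
--                 result[i] = j
--                 break
--     return result
-- ===== SOURCE B (Python) =====
-- from typing import List
--
-- def larger_index(arr: List) -> List:
--     n = len(arr)
--     result = [-1] * n
--     sm = []  # strict suffix-maxima indices seen so far: decreasing index, increasing value
--     for i in range(n - 1, -1, -1):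
--         # first position in sm whose value exceeds arr[i]  (values are sorted ascending)
--         lo, hi = 0, len(sm)
--         while lo < hi:
--             mid = (lo + hi) // 2
--             if arr[sm[mid]] > arr[i]:
--                 hi = mid
--             else:
--                 lo = mid + 1
--         if lo < len(sm):
--             result[i] = sm[lo]
--         if not sm or arr[i] > arr[sm[-1]]:
--             sm.append(i)
--     return result
-- ===== Notes on version B (the rewrite author's own statement) =====
-- stated objective: faster
-- what changed: Replaces the quadratic per-index backward scan by a single right-to-left pass that maintains the strict suffix-maxima index stack and binary-searches it for the rightmost later index with a greater value.
import Mathlib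
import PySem

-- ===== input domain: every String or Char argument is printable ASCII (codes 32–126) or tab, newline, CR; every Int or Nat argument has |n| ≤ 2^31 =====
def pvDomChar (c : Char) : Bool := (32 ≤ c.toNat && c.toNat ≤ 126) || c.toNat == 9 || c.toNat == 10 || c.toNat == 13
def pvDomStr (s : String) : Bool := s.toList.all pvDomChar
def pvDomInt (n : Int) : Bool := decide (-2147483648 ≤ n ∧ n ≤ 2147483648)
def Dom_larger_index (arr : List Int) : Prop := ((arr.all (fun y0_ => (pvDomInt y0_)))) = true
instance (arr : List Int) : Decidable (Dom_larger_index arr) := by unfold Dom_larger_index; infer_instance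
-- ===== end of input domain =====

-- B replaces A's quadratic per-index backward scan by one right-to-left pass over a
-- suffix-maxima stack queried by binary search (objective: faster, O(n log n)).

-- ===== PORT A =====
-- A's inner loop: scan j over the countdown range, break at the first hit (none = no hit)
def larger_index_inner (arr : List Int) (xi : Int) : List Int → Option Int
  | [] => none
  | j :: rest =>
    if PySem.List.pyGetD arr j 0 > xi then some j else larger_index_inner arr xi rest

def larger_index (arr : List Int) : List Int :=
  (PySem.List.pyRange 0 (arr.length : Int) 1).foldl
    (fun result i =>
      match larger_index_inner arr (PySem.List.pyGetD arr i 0)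
          (PySem.List.pyRange ((arr.length : Int) - 1) i (-1)) with
      | some j => PySem.List.pySetD result i j
      | none => result)
    (List.replicate arr.length (-1))

-- ===== PORT B =====
-- Source B's while-loop binary search: first position in sm[lo:hi] whose value exceeds x
def larger_index_bs (arr : List Int) (x : Int) (sm : List Int) (lo hi : Nat) : Nat :=
  if lo < hi then
    let mid := (lo + hi) / 2
    if PySem.List.pyGetD arr (sm.getD mid 0) 0 > x then larger_index_bs arr x sm lo mid
    else larger_index_bs arr x sm (mid + 1) hi
  else lo
termination_by hi - lo
decreasing_by all_goals omega

-- Source B's main loop, i = k-1 … 0; sm is the suffix-maxima index stack, acc the result built back-to-front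
def larger_index_go (arr : List Int) : Nat → List Int → List Int → List Int
  | 0, _, acc => acc
  | k + 1, sm, acc =>
    let xi := PySem.List.pyGetD arr (k : Int) 0
    let lo := larger_index_bs arr xi sm 0 sm.length
    let v : Int := if lo < sm.length then sm.getD lo 0 else -1
    let push := sm.isEmpty || decide (xi > PySem.List.pyGetD arr (sm.getD (sm.length - 1) 0) 0)
    larger_index_go arr k (if push then sm ++ [(k : Int)] else sm) (v :: acc)

def larger_index_alt (arr : List Int) : List Int := larger_index_go arr arr.length [] []

-- ===== PRECONDITION & SPEC =====
def Spec_larger_index (arr : List Int) (out : List Int) : Prop := out = larger_index_alt arr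
instance (arr : List Int) (out : List Int) : Decidable (Spec_larger_index arr out) := by unfold Spec_larger_index; infer_instance

-- ===== CLAIM (what is proved, stated in full; the proofs are below) =====
def Claim_equal_larger_index : Prop := ∀ (arr : List Int), Dom_larger_index arr → Spec_larger_index arr (larger_index arr)

-- ===== LEMMAS AND PROOFS =====

-- value at (nonnegative, in-range) index j
def valA (arr : List Int) (j : Int) : Int := PySem.List.pyGetD arr j 0
-- A's inner scan list for index i: n-1, n-2, …, i+1
def scanL (arr : List Int) (i : Int) : List Int := PySem.List.pyRange ((arr.length : Int) - 1) i (-1)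
-- the rightmost later index with a greater value (−1 if none): the common specification
def specAt (arr : List Int) (i : Int) : Int :=
  ((scanL arr i).find? (fun j => decide (valA arr i < valA arr j))).getD (-1)
-- j is a strict suffix maximum: greater than every element to its right
def isSM (arr : List Int) (j : Int) : Bool := (scanL arr j).all (fun k => decide (valA arr k < valA arr j))
-- the suffix maxima among indices > i, in scan (descending-index) order
def smL (arr : List Int) (i : Int) : List Int := (scanL arr i).filter (isSM arr)

theorem larger_index_inner_eq_find (arr : List Int) (xi : Int) (L : List Int) :
    larger_index_inner arr xi L = L.find? (fun j => decide (xi < PySem.List.pyGetD arr j 0)) := by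
  induction L with
  | nil => rfl
  | cons j rest ih =>
    simp only [larger_index_inner, List.find?_cons]
    by_cases h : xi < PySem.List.pyGetD arr j 0 <;> simp [h, ih]

-- partial-result invariant for A's outer fold
theorem larger_index_fold_inv (arr : List Int) (m : Nat) (hm : m ≤ arr.length) :
    ((List.range m).map (Nat.cast : Nat → Int)).foldl
      (fun result i =>
        match larger_index_inner arr (PySem.List.pyGetD arr i 0)
            (PySem.List.pyRange ((arr.length : Int) - 1) i (-1)) with
        | some j => PySem.List.pySetD result i j
        | none => result)
      (List.replicate arr.length (-1)) =
    (List.range arr.length).map (fun k => if k < m then specAt arr (k : Int) else -1) := by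
  induction m with
  | zero =>
    simp [List.map_const']
  | succ m ih =>
    rw [List.range_succ, List.map_append, List.foldl_append, ih (by omega)]
    simp only [List.map_cons, List.map_nil, List.foldl_cons, List.foldl_nil]
    rw [larger_index_inner_eq_find]
    have hfind : (PySem.List.pyRange ((arr.length : Int) - 1) (m : Int) (-1)).find?
        (fun j => decide (PySem.List.pyGetD arr (m : Int) 0 < PySem.List.pyGetD arr j 0)) =
        (scanL arr (m : Int)).find? (fun j => decide (valA arr (m : Int) < valA arr j)) := rfl
    rw [hfind]
    cases hf : (scanL arr (m : Int)).find? (fun j => decide (valA arr (m : Int) < valA arr j)) with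
    | none =>
      have hspec : specAt arr (m : Int) = -1 := by unfold specAt; rw [hf]; rfl
      dsimp only
      apply List.map_congr_left
      intro k hk
      rcases Nat.lt_trichotomy k m with h | h | h
      · simp [h, Nat.lt_succ_of_lt h]
      · subst h; simp [hspec]
      · simp [Nat.not_lt.mpr (Nat.le_of_lt h), Nat.not_lt.mpr h]
    | some j =>
      have hspec : specAt arr (m : Int) = j := by unfold specAt; rw [hf]; rfl
      dsimp only
      rw [PySem.List.pySetD_natCast]
      apply List.ext_getElem
      · simp
      · intro k hk1 hk2
        simp only [List.length_set, List.length_map, List.length_range] at hk1 hk2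
        rw [List.getElem_set]
        simp only [List.getElem_map, List.getElem_range]
        rcases Nat.lt_trichotomy k m with h | h | h
        · simp [Nat.ne_of_gt h, h, Nat.lt_succ_of_lt h]
        · subst h; simp [hspec]
        · simp [Nat.ne_of_lt h, Nat.not_lt.mpr (Nat.le_of_lt h), Nat.not_lt.mpr h]

theorem larger_index_eq_map (arr : List Int) :
    larger_index arr = (List.range arr.length).map (fun m : Nat => specAt arr (m : Int)) := by
  unfold larger_index
  rw [PySem.List.pyRange_zero_natCast, larger_index_fold_inv arr arr.length (le_refl _)]
  apply List.map_congr_left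
  intro k hk
  simp [List.mem_range.mp hk]

-- generic: filtering cannot change find? when the found element survives the filter
theorem find?_filter_first {α : Type} (p q : α → Bool) (L : List α)
    (h : ∀ x, L.find? p = some x → q x = true) :
    (L.filter q).find? p = L.find? p := by
  induction L with
  | nil => rfl
  | cons a t ih =>
    by_cases hp : p a = true
    · have hq := h a (by simp [List.find?_cons, hp])
      simp [List.filter_cons, hq, List.find?_cons, hp]
    · have hp' : p a = false := by simp [hp]
      by_cases hqa : q a = true
      · simp only [List.filter_cons, hqa, if_true, List.find?_cons, hp']
        exact ih (by intro x hx; exact h x (by simp [hp', hx]))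
      · simp only [List.filter_cons, hqa, List.find?_cons, hp']
        exact ih (by intro x hx; exact h x (by simp [hp', hx]))

-- the first hit of A's scan is a strict suffix maximum
theorem first_hit_isSM (arr : List Int) (i x : Int)
    (hfind : (scanL arr i).find? (fun j => decide (valA arr i < valA arr j)) = some x) :
    isSM arr x = true := by
  rw [List.find?_eq_some_iff_append] at hfind
  obtain ⟨hpx, as_, bs, heq, has⟩ := hfind
  have hxmem : x ∈ scanL arr i := by rw [heq]; simp
  have hix := PySem.List.mem_pyRange_neg_one.mp hxmem
  have hpair : List.Pairwise (fun a b => b < a) (scanL arr i) := by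
    unfold scanL
    rw [PySem.List.pyRange_neg_one_eq_reverse]
    exact List.pairwise_reverse.mpr (PySem.List.pairwise_lt_pyRange_one _ _)
  unfold isSM
  rw [List.all_eq_true]
  intro k hk
  have hk' := PySem.List.mem_pyRange_neg_one.mp hk
  have hkmem : k ∈ scanL arr i :=
    PySem.List.mem_pyRange_neg_one.mpr ⟨by omega, hk'.2⟩
  rw [heq] at hkmem hpair
  rcases List.mem_append.mp hkmem with hka | hkx
  · have hnk := has k hka
    simp only [Bool.not_eq_eq_eq_not, Bool.not_true, decide_eq_false_iff_not, Int.not_lt] at hnk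
    simp only [decide_eq_true_eq] at hpx ⊢
    omega
  · rcases List.mem_cons.mp hkx with rfl | hkbs
    · omega
    · rw [List.pairwise_append] at hpair
      have := (List.pairwise_cons.mp hpair.2.1).1 k hkbs
      omega

-- hence the spec can be computed on the suffix-maxima list alone
theorem specAt_eq_sm (arr : List Int) (i : Int) :
    specAt arr i = ((smL arr i).find? (fun j => decide (valA arr i < valA arr j))).getD (-1) := by
  unfold specAt smL
  rw [find?_filter_first]
  intro x hx
  exact first_hit_isSM arr i x hx

-- values along the suffix-maxima list are strictly ascending
theorem smL_pairwise (arr : List Int) (i : Int) :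
    (smL arr i).Pairwise (fun j1 j2 => valA arr j1 < valA arr j2) := by
  have hpair : List.Pairwise (fun a b => b < a) (scanL arr i) := by
    unfold scanL
    rw [PySem.List.pyRange_neg_one_eq_reverse]
    exact List.pairwise_reverse.mpr (PySem.List.pairwise_lt_pyRange_one _ _)
  refine List.Pairwise.imp_of_mem ?_ (hpair.filter (isSM arr))
  intro a b ha hb hab
  have hbsm : isSM arr b = true := (List.mem_filter.mp hb).2
  have hamem : a ∈ scanL arr i := (List.mem_filter.mp ha).1
  have ha' := PySem.List.mem_pyRange_neg_one.mp hamem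
  have hascan : a ∈ scanL arr b := PySem.List.mem_pyRange_neg_one.mpr ⟨hab, ha'.2⟩
  have := (List.all_eq_true.mp hbsm) a hascan
  simpa using this

-- the binary search returns a boundary position: everything before fails, the position itself (if any) succeeds
theorem bs_spec (arr : List Int) (x : Int) (sm : List Int)
    (hmono : ∀ m1 m2, m1 ≤ m2 → m2 < sm.length →
      x < PySem.List.pyGetD arr (sm.getD m1 0) 0 → x < PySem.List.pyGetD arr (sm.getD m2 0) 0) :
    ∀ (fuel lo hi : Nat), hi - lo ≤ fuel → hi ≤ sm.length → lo ≤ hi →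
    (∀ m, m < lo → ¬ x < PySem.List.pyGetD arr (sm.getD m 0) 0) →
    (∀ m, hi ≤ m → m < sm.length → x < PySem.List.pyGetD arr (sm.getD m 0) 0) →
    larger_index_bs arr x sm lo hi ≤ sm.length ∧
    (∀ m, m < larger_index_bs arr x sm lo hi → ¬ x < PySem.List.pyGetD arr (sm.getD m 0) 0) ∧
    (larger_index_bs arr x sm lo hi < sm.length →
      x < PySem.List.pyGetD arr (sm.getD (larger_index_bs arr x sm lo hi) 0) 0) := by
  intro fuel
  induction fuel with
  | zero =>
    intro lo hi hfuel hlen hlohi hbefore hafter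
    have : lo = hi := by omega
    subst this
    rw [larger_index_bs, if_neg (by omega)]
    exact ⟨hlen, hbefore, fun h => hafter lo (le_refl _) h⟩
  | succ fuel ih =>
    intro lo hi hfuel hlen hlohi hbefore hafter
    by_cases hlt : lo < hi
    · rw [larger_index_bs, if_pos hlt]
      dsimp only
      by_cases hp : x < PySem.List.pyGetD arr (sm.getD ((lo + hi) / 2) 0) 0
      · rw [if_pos hp]
        refine ih lo ((lo + hi) / 2) (by omega) (by omega) (by omega) hbefore ?_
        intro m hm hmlen
        exact hmono ((lo + hi) / 2) m hm hmlen hp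
      · rw [if_neg hp]
        refine ih ((lo + hi) / 2 + 1) hi (by omega) hlen (by omega) ?_ hafter
        intro m hm
        rcases Nat.lt_or_ge m lo with h | h
        · exact hbefore m h
        · intro hpm
          exact hp (hmono m ((lo + hi) / 2) (by omega) (by omega) hpm)
    · rw [larger_index_bs, if_neg hlt]
      have : lo = hi := by omega
      subst this
      exact ⟨hlen, hbefore, fun h => hafter lo (le_refl _) h⟩

-- find? of a list whose first satisfying position is known
theorem find?_eq_of_least {α : Type} (p : α → Bool) :
    ∀ (L : List α) (r : Nat), r ≤ L.length →
    (∀ m (h : m < L.length), m < r → ¬ p L[m] = true) →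
    (∀ h : r < L.length, p L[r] = true) →
    L.find? p = if h : r < L.length then some L[r] else none := by
  intro L
  induction L with
  | nil =>
    intro r _ _ _
    simp
  | cons a t ih =>
    intro r hr hbefore hat
    cases r with
    | zero =>
      have hpa : p a = true := by simpa using hat (by simp)
      simp [hpa]
    | succ m =>
      have hpa : ¬ p a = true := by
        have := hbefore 0 (by simp) (by omega)
        simpa using this
      rw [List.find?_cons_of_neg (by simpa using hpa)]
      rw [ih m (by simpa using hr)
        (fun k hk hkm => by simpa using hbefore (k + 1) (by simpa using Nat.succ_lt_succ hk) (by omega))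
        (fun h => by simpa using hat (by simpa using Nat.succ_lt_succ h))]
      by_cases h : m < t.length
      · rw [dif_pos h, dif_pos (by simpa using Nat.succ_lt_succ h)]
        simp
      · rw [dif_neg h, dif_neg (by simp; omega)]

-- Source B's query step computes specAt
theorem step_value (arr : List Int) (i : Int) :
    (if larger_index_bs arr (PySem.List.pyGetD arr i 0) (smL arr i) 0 (smL arr i).length < (smL arr i).length
      then (smL arr i).getD (larger_index_bs arr (PySem.List.pyGetD arr i 0) (smL arr i) 0 (smL arr i).length) 0
      else -1) = specAt arr i := by
  set sm := smL arr i with hsm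
  have hpw := smL_pairwise arr i
  rw [← hsm] at hpw
  have hpwg : ∀ (m1 m2 : Nat) (h1 : m1 < sm.length) (h2 : m2 < sm.length), m1 < m2 →
      valA arr (sm[m1]) < valA arr (sm[m2]) := by
    intro m1 m2 h1 h2 h12
    exact List.pairwise_iff_getElem.mp hpw m1 m2 h1 h2 h12
  have hmono : ∀ m1 m2, m1 ≤ m2 → m2 < sm.length →
      PySem.List.pyGetD arr i 0 < PySem.List.pyGetD arr (sm.getD m1 0) 0 →
      PySem.List.pyGetD arr i 0 < PySem.List.pyGetD arr (sm.getD m2 0) 0 := by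
    intro m1 m2 h12 h2 h1v
    rcases Nat.eq_or_lt_of_le h12 with rfl | hlt
    · exact h1v
    · have h1 : m1 < sm.length := by omega
      have := hpwg m1 m2 h1 h2 hlt
      rw [List.getD_eq_getElem sm 0 h2]
      rw [List.getD_eq_getElem sm 0 h1] at h1v
      simp only [valA] at this
      omega
  obtain ⟨hle, hbef, hat⟩ := bs_spec arr (PySem.List.pyGetD arr i 0) sm hmono
    (sm.length) 0 sm.length (by omega) (le_refl _) (by omega)
    (by intro m hm; omega) (by intro m hm hml; omega)
  set r := larger_index_bs arr (PySem.List.pyGetD arr i 0) sm 0 sm.length with hr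
  rw [specAt_eq_sm, ← hsm]
  rw [find?_eq_of_least (fun j => decide (valA arr i < valA arr j)) sm r hle
    (fun m hml hmr => by
      have := hbef m hmr
      rw [List.getD_eq_getElem sm 0 hml] at this
      simpa [valA] using this)
    (fun h => by
      have := hat h
      rw [List.getD_eq_getElem sm 0 h] at this
      simpa [valA] using this)]
  by_cases h : r < sm.length
  · rw [dif_pos h, if_pos h, List.getD_eq_getElem sm 0 h]
    rfl
  · rw [dif_neg h, if_neg h]
    rfl

-- every index of the scan is dominated in value by some suffix maximum
theorem dominated (arr : List Int) (i : Int) :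
    ∀ (d : Nat) (k : Int), (((arr.length : Int) - 1 - k)).toNat ≤ d → k ∈ scanL arr i →
    ∃ j ∈ smL arr i, valA arr k ≤ valA arr j := by
  intro d
  induction d with
  | zero =>
    intro k hd hk
    have hk' := PySem.List.mem_pyRange_neg_one.mp hk
    have hkeq : k = (arr.length : Int) - 1 := by omega
    have hsm : isSM arr k = true := by
      unfold isSM
      rw [List.all_eq_true]
      intro a ha
      have := PySem.List.mem_pyRange_neg_one.mp ha
      omega
    exact ⟨k, List.mem_filter.mpr ⟨hk, hsm⟩, le_refl _⟩
  | succ d ih =>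
    intro k hd hk
    by_cases hsm : isSM arr k = true
    · exact ⟨k, List.mem_filter.mpr ⟨hk, hsm⟩, le_refl _⟩
    · have hk' := PySem.List.mem_pyRange_neg_one.mp hk
      obtain ⟨k', hk'mem, hk'v⟩ : ∃ k' ∈ scanL arr k, valA arr k ≤ valA arr k' := by
        unfold isSM at hsm
        rw [List.all_eq_true] at hsm
        simp only [not_forall] at hsm
        obtain ⟨k', hmem, hv⟩ := hsm
        exact ⟨k', hmem, by simpa using hv⟩
      have hk'' := PySem.List.mem_pyRange_neg_one.mp hk'mem
      obtain ⟨j, hj, hjv⟩ := ih k' (by omega)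
        (PySem.List.mem_pyRange_neg_one.mpr ⟨by omega, hk''.2⟩)
      exact ⟨j, hj, le_trans hk'v hjv⟩

-- every suffix maximum's value is at most the last one's (values ascend)
theorem le_getLast_of_pairwise (arr : List Int) :
    ∀ (l : List Int), l.Pairwise (fun j1 j2 => valA arr j1 < valA arr j2) →
    ∀ x ∈ l, ∀ (h : l ≠ []), valA arr x ≤ valA arr (l.getLast h) := by
  intro l
  induction l with
  | nil => intro _ x hx; simp at hx
  | cons a t ih =>
    intro hpw x hx h
    rcases List.mem_cons.mp hx with rfl | hxt
    · cases t with
      | nil => simp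
      | cons b u =>
        have hlast : (x :: b :: u).getLast h = (b :: u).getLast (by simp) := by
          simp [List.getLast]
        rw [hlast]
        have hbu := (List.pairwise_cons.mp hpw).1
        have hmem : (b :: u).getLast (by simp) ∈ b :: u := List.getLast_mem _
        exact le_of_lt (hbu _ hmem)
    · cases t with
      | nil => simp at hxt
      | cons b u =>
        have hlast : (a :: b :: u).getLast h = (b :: u).getLast (by simp) := by
          simp [List.getLast]
        rw [hlast]
        exact ih (List.pairwise_cons.mp hpw).2 x hxt (by simp)

-- Source B's push test is exactly the strict-suffix-maximum test
theorem push_iff (arr : List Int) (i : Int) :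
    ((smL arr i).isEmpty ||
      decide (PySem.List.pyGetD arr i 0 >
        PySem.List.pyGetD arr ((smL arr i).getD ((smL arr i).length - 1) 0) 0)) = isSM arr i := by
  cases hsm : smL arr i with
  | nil =>
    have hscan : scanL arr i = [] := by
      by_contra hnil
      obtain ⟨k, hk⟩ := List.exists_mem_of_ne_nil _ hnil
      obtain ⟨j, hj, _⟩ := dominated arr i (((arr.length : Int) - 1 - k)).toNat k (le_refl _) hk
      rw [hsm] at hj
      simp at hj
    have hT : isSM arr i = true := by unfold isSM; rw [hscan]; rfl
    rw [hT]
    rfl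
  | cons a t =>
    rw [← hsm]
    have hne : smL arr i ≠ [] := by rw [hsm]; simp
    have hpos : 0 < (smL arr i).length := List.length_pos_of_ne_nil hne
    have hlast : (smL arr i).getD ((smL arr i).length - 1) 0 = (smL arr i).getLast hne := by
      rw [List.getD_eq_getElem _ _ (by omega), List.getLast_eq_getElem]
    have hlastmem : (smL arr i).getLast hne ∈ smL arr i := List.getLast_mem hne
    have hlscan : (smL arr i).getLast hne ∈ scanL arr i := (List.mem_filter.mp hlastmem).1
    rw [hlast]
    by_cases hP : PySem.List.pyGetD arr ((smL arr i).getLast hne) 0 < PySem.List.pyGetD arr i 0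
    · have hT : isSM arr i = true := by
        unfold isSM
        rw [List.all_eq_true]
        intro k hk
        obtain ⟨j, hj, hjv⟩ := dominated arr i (((arr.length : Int) - 1 - k)).toNat k (le_refl _) hk
        have hjle := le_getLast_of_pairwise arr (smL arr i) (smL_pairwise arr i) j hj hne
        simp only [valA] at hjv hjle ⊢
        simp only [decide_eq_true_eq]
        omega
      rw [hT]
      simp [hP]
    · have hF : isSM arr i = false := by
        by_contra hT
        rw [Bool.not_eq_false] at hT
        unfold isSM at hT
        rw [List.all_eq_true] at hT
        have := hT _ hlscan
        simp only [valA, decide_eq_true_eq] at this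
        exact hP this
      rw [hF]
      simp only [Bool.or_eq_false_iff, List.isEmpty_eq_false_iff]
      exact ⟨hne, by simpa using hP⟩

-- appending the next index to the scan
theorem scanL_step (arr : List Int) (i : Int) (hn : i < (arr.length : Int)) :
    scanL arr (i - 1) = scanL arr i ++ [i] := by
  unfold scanL
  rw [PySem.List.pyRange_neg_one_eq_reverse, PySem.List.pyRange_neg_one_eq_reverse]
  have h1 : (i - 1) + 1 = i := by omega
  have h2 : ((arr.length : Int) - 1) + 1 = (arr.length : Int) := by omega
  rw [h1, h2]
  rw [PySem.List.pyRange_one_cons hn]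
  simp

-- one step of the suffix-maxima stack
theorem smL_step (arr : List Int) (i : Int) (h0 : 0 ≤ i) (hn : i < (arr.length : Int)) :
    smL arr (i - 1) = smL arr i ++ (if isSM arr i then [i] else []) := by
  unfold smL
  rw [scanL_step arr i hn, List.filter_append]
  congr 1
  by_cases h : isSM arr i
  · simp [h]
  · simp [h]

-- main invariant of Source B's loop
theorem go_inv (arr : List Int) :
    ∀ (k : Nat), k ≤ arr.length → ∀ acc,
    larger_index_go arr k (smL arr ((k : Int) - 1)) acc =
      (List.range k).map (fun m : Nat => specAt arr (m : Int)) ++ acc := by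
  intro k
  induction k with
  | zero => intro _ acc; rfl
  | succ k ih =>
    intro hk acc
    have hcast : ((k + 1 : Nat) : Int) - 1 = (k : Int) := by push_cast; ring
    rw [larger_index_go]
    rw [hcast]
    rw [push_iff arr (k : Int), step_value arr (k : Int)]
    have hsm' : (if isSM arr (k : Int) then smL arr (k : Int) ++ [(k : Int)] else smL arr (k : Int)) =
        smL arr ((k : Int) - 1) := by
      rw [smL_step arr (k : Int) (by omega) (by exact_mod_cast hk)]
      by_cases h : isSM arr (k : Int) <;> simp [h]
    rw [hsm']
    rw [ih (by omega) (specAt arr (k : Int) :: acc)]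
    rw [List.range_succ, List.map_append]
    simp

theorem larger_index_alt_eq_map (arr : List Int) :
    larger_index_alt arr = (List.range arr.length).map (fun m : Nat => specAt arr (m : Int)) := by
  unfold larger_index_alt
  have hempty : smL arr ((arr.length : Int) - 1) = [] := by
    unfold smL scanL
    rw [PySem.List.pyRange_neg_one_eq_nil (le_refl _)]
    rfl
  nth_rewrite 1 [← hempty]
  rw [go_inv arr arr.length (le_refl _) []]
  simp

-- ===== VERDICT (by name: the statement is the Claim_ definition above) =====
theorem larger_index_spec : Claim_equal_larger_index := by
  intro arr _
  show larger_index arr = larger_index_alt arr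
  rw [larger_index_eq_map, larger_index_alt_eq_map]
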